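-- pv_equiv track=rewrite | github.com/johannas/AustralienFiresFromSpace_Schoeggl_Vorauer | Notebooks/helferlein.py | dicconv
-- ===== SOURCE A (Python) =====
-- def dicconv(lis):
--     import copy
-- #    dic0 = {}
--     dic0 = copy.deepcopy(lis[0])
--     keys = dic0.keys()
--     for i in lis[1:]:
--         for j in keys:
--             dic0[j]+=i[j]
--     return dic0
-- ===== SOURCE B (Python) =====
-- def dicconv(lis):
--     first = lis[0]
--     return {k: sum((d[k] for d in lis[1:]), first[k]) for k in first}
-- ===== Notes on version B (the rewrite author's own statement) =====
-- stated objective: simpler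
-- what changed: A loops dict-by-dict mutating an accumulator dict key-by-key; B transposes the iteration: one dict comprehension over the first dict's keys, each value the sum of that key's column across the remaining dicts.
import Mathlib
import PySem

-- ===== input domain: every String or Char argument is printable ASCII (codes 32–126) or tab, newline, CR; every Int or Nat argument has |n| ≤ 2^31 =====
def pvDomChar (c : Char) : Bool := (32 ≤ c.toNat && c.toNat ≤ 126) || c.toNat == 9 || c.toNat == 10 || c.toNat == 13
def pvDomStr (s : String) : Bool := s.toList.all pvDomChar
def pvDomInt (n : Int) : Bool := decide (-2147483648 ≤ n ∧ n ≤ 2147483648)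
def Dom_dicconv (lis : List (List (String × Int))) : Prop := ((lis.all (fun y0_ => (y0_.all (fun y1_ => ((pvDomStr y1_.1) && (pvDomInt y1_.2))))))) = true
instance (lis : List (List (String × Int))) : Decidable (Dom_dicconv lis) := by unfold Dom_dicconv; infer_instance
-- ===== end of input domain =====

-- B replaces A's dict-by-dict accumulator mutation with a per-key comprehension summing
-- each key's column across the remaining dicts (objective: simpler).


-- ===== PORT A =====
-- dic0 = deepcopy(lis[0]); keys = dic0.keys(); for i in lis[1:]: for j in keys: dic0[j] += i[j]
def dicconv (lis : List (List (String × Int))) : List (String × Int) :=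
  match lis with
  | [] => []   -- Python: IndexError on lis[0]; excluded by Pre_
  | h :: t =>
    let dic0 := PySem.Dict.ofList h
    let keys := dic0.keys
    (t.foldl (fun d i =>
        let di := PySem.Dict.ofList i
        keys.foldl (fun d j => d.modify j 0 (fun v => v + di.getD j 0)) d) dic0).items

-- ===== PORT B =====
-- first = lis[0]; {k: sum((d[k] for d in lis[1:]), first[k]) for k in first}
def dicconv_alt (lis : List (List (String × Int))) : List (String × Int) :=
  match lis with
  | [] => []   -- Python: IndexError on lis[0]; excluded by Pre_
  | h :: t =>
    let first := PySem.Dict.ofList h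
    first.keys.map (fun k =>
      (k, t.foldl (fun acc d => acc + (PySem.Dict.ofList d).getD k 0) (first.getD k 0)))

-- ===== PRECONDITION & SPEC =====
-- Pre_ excludes exactly the inputs on which A raises: the empty list (IndexError on lis[0])
-- and lists where some later dict is missing a key of lis[0] (KeyError on i[j]).
def Pre_dicconv (lis : List (List (String × Int))) : Prop :=
  lis ≠ [] ∧
  (lis.all (fun d => (lis.headD []).all
      (fun p => (PySem.Dict.ofList d).contains p.1))) = true
instance (lis : List (List (String × Int))) : Decidable (Pre_dicconv lis) := by
  unfold Pre_dicconv; infer_instance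

def pvWitness_dicconv : (List (List (String × Int))) := [[("a", 1), ("b", 2)], [("b", 4), ("a", 3)]]

def Spec_dicconv (lis : List (List (String × Int))) (out : List (String × Int)) : Prop := out = dicconv_alt lis
instance (lis : List (List (String × Int))) (out : List (String × Int)) : Decidable (Spec_dicconv lis out) := by unfold Spec_dicconv; infer_instance

-- ===== CLAIM (what is proved, stated in full; the proofs are below) =====
def Claim_equal_dicconv : Prop := ∀ (lis : List (List (String × Int))), Dom_dicconv lis → Pre_dicconv lis → Spec_dicconv lis (dicconv lis)

-- ===== LEMMAS AND PROOFS =====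

-- inner loop: folding `d[j] += g j` over a key list adds (count of k in ks) * g k at k
theorem inner_getD (ks : List String) (g : String → Int) :
    ∀ (d : PySem.Dict String Int) (k : String),
      (ks.foldl (fun d j => d.modify j 0 (fun v => v + g j)) d).getD k 0
        = d.getD k 0 + (ks.count k : Int) * g k := by
  induction ks with
  | nil => intro d k; simp
  | cons j rest ih =>
    intro d k
    simp only [List.foldl_cons, ih, PySem.Dict.getD_modify, List.count_cons]
    by_cases hk : k = j
    · simp [hk]; ring
    · have hjk : (j == k) = false := by simp [Ne.symm hk]
      simp [if_neg hk, hjk]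

-- inner loop preserves the key list when every updated key is already present
theorem inner_keys (ks : List String) (g : String → Int) :
    ∀ (d : PySem.Dict String Int), (∀ j ∈ ks, d.contains j = true) →
      (ks.foldl (fun d j => d.modify j 0 (fun v => v + g j)) d).keys = d.keys := by
  induction ks with
  | nil => intro d _; simp
  | cons j rest ih =>
    intro d hall
    simp only [List.foldl_cons]
    rw [ih _ (fun j' hj' => by
          rw [PySem.Dict.contains_modify]
          simp [hall j' (List.mem_cons_of_mem _ hj')])]
    rw [PySem.Dict.keys_modify,
        PySem.Dict.keys_insert_of_contains _ _ (hall j (List.mem_cons_self))]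

-- outer loop: keys are preserved throughout and values accumulate per key
theorem outer_keys (t : List (List (String × Int))) (ks : List String) :
    ∀ (d : PySem.Dict String Int), d.keys = ks →
      (t.foldl (fun d i =>
          ks.foldl (fun d j => d.modify j 0 (fun v => v + (PySem.Dict.ofList i).getD j 0)) d) d).keys = ks := by
  induction t with
  | nil => intro d h; simpa using h
  | cons i rest ih =>
    intro d h
    simp only [List.foldl_cons]
    exact ih _ (by
      rw [inner_keys _ _ _ (fun j hj => by
        rw [PySem.Dict.contains_iff_mem_keys, h]; exact hj)]
      exact h)

theorem outer_getD (t : List (List (String × Int))) (ks : List String) (k : String) :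
    ∀ (d : PySem.Dict String Int),
      (t.foldl (fun d i =>
          ks.foldl (fun d j => d.modify j 0 (fun v => v + (PySem.Dict.ofList i).getD j 0)) d) d).getD k 0
        = d.getD k 0 + (t.map (fun i => (ks.count k : Int) * (PySem.Dict.ofList i).getD k 0)).sum := by
  induction t with
  | nil => intro d; simp
  | cons i rest ih =>
    intro d
    simp only [List.foldl_cons, ih, inner_getD, List.map_cons, List.sum_cons]
    ring

-- ===== VERDICT (by name: the statement is the Claim_ definition above) =====
theorem dicconv_spec : Claim_equal_dicconv := by
  intro lis _ hpre
  unfold Spec_dicconv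
  match lis with
  | [] => exact absurd rfl hpre.1
  | h :: t =>
    simp only [dicconv, dicconv_alt]
    have hnd : (PySem.Dict.ofList h).keys.Nodup := PySem.Dict.nodup_keys_ofList h
    have hkeys := outer_keys t (PySem.Dict.ofList h).keys (PySem.Dict.ofList h) rfl
    rw [PySem.Dict.items_eq_map_keys _ (by rw [hkeys]; exact hnd) 0, hkeys]
    apply List.map_congr_left
    intro k hk
    rw [outer_getD, PySem.List.foldl_add, List.count_eq_one_of_mem hnd hk]
    simp
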